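-- pv_equiv track=rewrite | github.com/liuyh-beep/Triton_RVV | benchmark/auto-tuner/analysis_correlation.py | categorize_metrics
-- ===== SOURCE A (Python) =====
-- def categorize_metrics(metrics):
--     """Categorize metrics into cache, instruction, and micro operation metrics."""
--
--     # add new metrics as you need
--     cache_metrics = [col for col in metrics if any(x in col.lower() for x in
--                     ['l1d', 'l2', 'cache', 'miss', 'access', 'load_access', 'store_access', 'miss_rate'])]
--
--     instruction_metrics = [col for col in metrics if any(x in col.lower() for x in
--                           ['inst', 'instruction', 'vector_load_inst', 'vector_store_inst', 'vector_inst'])]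
--
--     micro_op_metrics = [col for col in metrics if any(x in col.lower() for x in
--                        ['cycle', 'vfpu', 'vidu', 'micro_op', 'u_mode'])]
--
--     instruction_metrics = [x for x in instruction_metrics if x not in cache_metrics]
--     micro_op_metrics = [x for x in micro_op_metrics if x not in cache_metrics and x not in instruction_metrics]
--
--     return cache_metrics, instruction_metrics, micro_op_metrics
-- ===== SOURCE B (Python) =====
-- def categorize_metrics(metrics):
--     """Categorize metrics into cache, instruction, and micro operation metrics."""
--     # Single pass: the if/elif cascade encodes A's cache > instruction > micro-op priority.
--     cache_keys = ['l1d', 'l2', 'cache', 'miss', 'access', 'load_access', 'store_access', 'miss_rate']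
--     inst_keys = ['inst', 'instruction', 'vector_load_inst', 'vector_store_inst', 'vector_inst']
--     micro_keys = ['cycle', 'vfpu', 'vidu', 'micro_op', 'u_mode']
--     cache_metrics, instruction_metrics, micro_op_metrics = [], [], []
--     for col in metrics:
--         lower = col.lower()
--         if any(x in lower for x in cache_keys):
--             cache_metrics.append(col)
--         elif any(x in lower for x in inst_keys):
--             instruction_metrics.append(col)
--         elif any(x in lower for x in micro_keys):
--             micro_op_metrics.append(col)
--     return cache_metrics, instruction_metrics, micro_op_metrics
-- ===== Notes on version B (the rewrite author's own statement) =====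
-- stated objective: simpler
-- what changed: Replaces A's three full-list comprehensions plus two membership-based set-difference passes with one single-pass loop that lowercases each name once and classifies it by an if/elif priority cascade (cache > instruction > micro-op).
import Mathlib
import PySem

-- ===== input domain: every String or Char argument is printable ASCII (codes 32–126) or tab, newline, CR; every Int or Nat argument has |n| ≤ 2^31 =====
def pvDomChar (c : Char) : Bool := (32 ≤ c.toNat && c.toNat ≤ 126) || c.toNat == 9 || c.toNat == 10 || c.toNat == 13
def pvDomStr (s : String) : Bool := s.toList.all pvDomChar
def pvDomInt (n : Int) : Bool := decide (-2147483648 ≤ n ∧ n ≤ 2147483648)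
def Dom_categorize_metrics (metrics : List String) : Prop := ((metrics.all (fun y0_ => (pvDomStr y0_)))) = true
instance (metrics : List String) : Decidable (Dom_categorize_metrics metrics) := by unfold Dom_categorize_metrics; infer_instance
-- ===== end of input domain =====

-- B replaces A's three comprehensions + two membership-difference passes by one
-- single-pass if/elif cascade (cache > instruction > micro-op); objective: simpler.


-- ===== PORT A =====
def categorize_metrics (metrics : List String) : List String × List String × List String :=
  let cache_metrics := metrics.filter (fun col =>
    (["l1d", "l2", "cache", "miss", "access", "load_access", "store_access", "miss_rate"] : List String).any
      (fun x => PySem.Str.isIn x (PySem.Str.lower col)))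
  let instruction_metrics := metrics.filter (fun col =>
    (["inst", "instruction", "vector_load_inst", "vector_store_inst", "vector_inst"] : List String).any
      (fun x => PySem.Str.isIn x (PySem.Str.lower col)))
  let micro_op_metrics := metrics.filter (fun col =>
    (["cycle", "vfpu", "vidu", "micro_op", "u_mode"] : List String).any
      (fun x => PySem.Str.isIn x (PySem.Str.lower col)))
  let instruction_metrics2 := instruction_metrics.filter (fun x => !(cache_metrics.contains x))
  let micro_op_metrics2 := micro_op_metrics.filter (fun x =>
    !(cache_metrics.contains x) && !(instruction_metrics2.contains x))
  (cache_metrics, instruction_metrics2, micro_op_metrics2)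

-- ===== PORT B =====
def pvCacheKeys : List String := ["l1d", "l2", "cache", "miss", "access", "load_access", "store_access", "miss_rate"]
def pvInstKeys : List String := ["inst", "instruction", "vector_load_inst", "vector_store_inst", "vector_inst"]
def pvMicroKeys : List String := ["cycle", "vfpu", "vidu", "micro_op", "u_mode"]

def categorize_metrics_alt (metrics : List String) : List String × List String × List String :=
  metrics.foldl (fun acc col =>
    let lower := PySem.Str.lower col
    if pvCacheKeys.any (fun x => PySem.Str.isIn x lower) then
      (acc.1 ++ [col], acc.2.1, acc.2.2)
    else if pvInstKeys.any (fun x => PySem.Str.isIn x lower) then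
      (acc.1, acc.2.1 ++ [col], acc.2.2)
    else if pvMicroKeys.any (fun x => PySem.Str.isIn x lower) then
      (acc.1, acc.2.1, acc.2.2 ++ [col])
    else acc) ([], [], [])

-- ===== PRECONDITION & SPEC =====
def Spec_categorize_metrics (metrics : List String) (out : List String × List String × List String) : Prop := out = categorize_metrics_alt metrics
instance (metrics : List String) (out : List String × List String × List String) : Decidable (Spec_categorize_metrics metrics out) := by unfold Spec_categorize_metrics; infer_instance

-- ===== CLAIM (what is proved, stated in full; the proofs are below) =====
def Claim_equal_categorize_metrics : Prop := ∀ (metrics : List String), Dom_categorize_metrics metrics → Spec_categorize_metrics metrics (categorize_metrics metrics)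

-- ===== LEMMAS AND PROOFS =====

def pvC (col : String) : Bool :=
  (["l1d", "l2", "cache", "miss", "access", "load_access", "store_access", "miss_rate"] : List String).any
    (fun x => PySem.Str.isIn x (PySem.Str.lower col))
def pvI (col : String) : Bool :=
  (["inst", "instruction", "vector_load_inst", "vector_store_inst", "vector_inst"] : List String).any
    (fun x => PySem.Str.isIn x (PySem.Str.lower col))
def pvM (col : String) : Bool :=
  (["cycle", "vfpu", "vidu", "micro_op", "u_mode"] : List String).any
    (fun x => PySem.Str.isIn x (PySem.Str.lower col))

theorem pv_contains_filter {p : String → Bool} {l : List String} {x : String}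
    (hx : x ∈ l) : (l.filter p).contains x = p x := by
  cases hp : p x <;> simp [List.contains_eq_mem, List.mem_filter, hp, hx]

-- characterization of B's fold, with the three predicates abstract
theorem pvFold_char (p q r : String → Bool) (l : List String) (a b c : List String) :
    l.foldl (fun acc col =>
      if p col then (acc.1 ++ [col], acc.2.1, acc.2.2)
      else if q col then (acc.1, acc.2.1 ++ [col], acc.2.2)
      else if r col then (acc.1, acc.2.1, acc.2.2 ++ [col])
      else acc) (a, b, c) =
    (a ++ l.filter p,
     b ++ l.filter (fun x => !p x && q x),
     c ++ l.filter (fun x => !p x && !q x && r x)) := by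
  induction l generalizing a b c with
  | nil => simp
  | cons hd tl ih =>
    cases hp : p hd <;> cases hq : q hd <;> cases hr : r hd <;>
      simp [hp, hq, hr, ih, List.filter_cons]

-- characterization of A (the two membership-difference passes collapse to filters)
theorem pvA_char (metrics : List String) :
    categorize_metrics metrics =
    (metrics.filter pvC,
     metrics.filter (fun x => !pvC x && pvI x),
     metrics.filter (fun x => !pvC x && !pvI x && pvM x)) := by
  have hA : categorize_metrics metrics =
      (metrics.filter pvC,
       (metrics.filter pvI).filter (fun x => !(metrics.filter pvC).contains x),
       (metrics.filter pvM).filter (fun x =>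
         !(metrics.filter pvC).contains x &&
         !(((metrics.filter pvI).filter (fun x => !(metrics.filter pvC).contains x)).contains x))) := rfl
  rw [hA]
  have hI2 : (metrics.filter pvI).filter (fun x => !(metrics.filter pvC).contains x)
      = metrics.filter (fun x => !pvC x && pvI x) := by
    rw [List.filter_filter]
    refine List.filter_congr ?_
    intro x hx
    rw [pv_contains_filter hx]
  have hM2 : (metrics.filter pvM).filter (fun x =>
        !(metrics.filter pvC).contains x &&
        !(((metrics.filter pvI).filter (fun x => !(metrics.filter pvC).contains x)).contains x))
      = metrics.filter (fun x => !pvC x && !pvI x && pvM x) := by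
    rw [List.filter_filter]
    refine List.filter_congr ?_
    intro x hx
    rw [pv_contains_filter hx, hI2, pv_contains_filter hx]
    cases h1 : pvC x <;> cases h2 : pvI x <;> cases h3 : pvM x <;> simp [h1, h2, h3]
  rw [hM2, hI2]

-- ===== VERDICT (by name: the statement is the Claim_ definition above) =====
theorem categorize_metrics_spec : Claim_equal_categorize_metrics := by
  intro metrics _
  unfold Spec_categorize_metrics
  have hB := pvFold_char pvC pvI pvM metrics [] [] []
  simp only [List.nil_append] at hB
  rw [pvA_char]
  exact hB.symm
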